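-- pv_equiv track=rewrite | github.com/beep-love/reid | triplet_batch_dataset.py | find_similar_vehicles_same_camera
-- ===== SOURCE A (Python) =====
-- from collections import defaultdict
--
-- def find_similar_vehicles_same_camera(args):
--     vehicle_id, vehicle_attributes, vehicle_camera_dict = args
--     similar_vehicles_same_camera = defaultdict(set)  # Use a set for faster membership check
--     similar_vehicles_different_camera = set()  # Use a set for faster membership check
--     vtype, color = vehicle_attributes[vehicle_id]
--     current_vehicle_cameras = set(vehicle_camera_dict[vehicle_id].keys())
--
--     for other_id in vehicle_attributes:
--         if vehicle_id != other_id: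
--             other_vtype, other_color = vehicle_attributes[other_id]
--             if vtype == other_vtype and color == other_color:
--                 other_vehicle_cameras = set(vehicle_camera_dict[other_id].keys())
--                 common_cameras = current_vehicle_cameras.intersection(other_vehicle_cameras)
--                 if common_cameras:
--                     for camera_id in common_cameras:
--                         similar_vehicles_same_camera[camera_id].add(other_id)
--                 else :
--                     similar_vehicles_different_camera.add(other_id)
--
--     return vehicle_id, {camera_id: list(vehicles) for camera_id, vehicles in similar_vehicles_same_camera.items()}, list(similar_vehicles_different_camera)
-- ===== SOURCE B (Python) =====
-- def find_similar_vehicles_same_camera(args):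
--     vehicle_id, vehicle_attributes, vehicle_camera_dict = args
--     target = vehicle_attributes[vehicle_id]
--     current_cameras = set(vehicle_camera_dict[vehicle_id].keys())
--     # camera-major gather instead of A's vehicle-major scatter:
--     # 1. one map from each matching vehicle to its common-camera list
--     common = {o: list(current_cameras & set(vehicle_camera_dict[o].keys()))
--               for o in vehicle_attributes
--               if o != vehicle_id and vehicle_attributes[o] == target}
--     # 2. the cameras, in order of first appearance
--     cam_order = dict.fromkeys(c for cams in common.values() for c in cams)
--     # 3. per camera, gather the vehicles seen on it; 4. vehicles sharing no camera
--     same = {cam: list({o for o, cams in common.items() if cam in cams})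
--             for cam in cam_order}
--     diff = list({o for o, cams in common.items() if not cams})
--     return vehicle_id, same, diff
-- ===== Notes on version B (the rewrite author's own statement) =====
-- stated objective: alternative
-- what changed: A is a vehicle-major scatter: one loop that pushes each matching vehicle into a defaultdict entry per common camera; B is a camera-major gather: it builds one map from each matching vehicle to its common-camera list, derives the camera order by first appearance, then for each camera gathers the matching vehicles by a membership scan, and takes the no-common-camera vehicles directly from the map.
import Mathlib
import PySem

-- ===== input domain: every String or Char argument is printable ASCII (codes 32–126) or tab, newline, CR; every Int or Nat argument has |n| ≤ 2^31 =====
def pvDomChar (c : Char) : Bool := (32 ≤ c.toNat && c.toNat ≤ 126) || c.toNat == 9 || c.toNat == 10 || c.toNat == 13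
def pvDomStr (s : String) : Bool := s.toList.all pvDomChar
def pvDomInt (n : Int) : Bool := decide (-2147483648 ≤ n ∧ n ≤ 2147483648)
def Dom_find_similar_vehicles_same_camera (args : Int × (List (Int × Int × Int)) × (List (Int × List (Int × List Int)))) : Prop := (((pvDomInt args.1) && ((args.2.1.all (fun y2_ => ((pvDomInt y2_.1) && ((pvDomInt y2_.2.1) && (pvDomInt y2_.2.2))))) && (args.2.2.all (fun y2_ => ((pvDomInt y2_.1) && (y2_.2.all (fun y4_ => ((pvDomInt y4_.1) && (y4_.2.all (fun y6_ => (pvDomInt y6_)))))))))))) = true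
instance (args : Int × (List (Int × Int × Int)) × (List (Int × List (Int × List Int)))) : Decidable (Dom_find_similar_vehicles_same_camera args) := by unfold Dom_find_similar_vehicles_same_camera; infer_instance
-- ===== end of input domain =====

-- B replaces A's vehicle-major scatter (one loop pushing each matching vehicle into a
-- defaultdict entry per common camera) by a camera-major gather: one map from each matching
-- vehicle to its common-camera list, the camera order by first appearance, then per camera a
-- gather scan over the matching vehicles; objective: alternative decomposition, same cost.
-- The Python result depends on CPython's set iteration order for int elements; both ports
-- compute that order with the cpy* model below (CPython's open-addressing table,
-- LINEAR_PROBES = 9, PERTURB_SHIFT = 5, growth ×4 below 50000), shared by both ports the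
-- way both Pythons share the interpreter's set type.

-- ===== PORT A =====
-- exact model of a CPython set of ints: hash(n) = n except hash(-1) = -2
def cpyHash (n : Int) : Int := if n = -1 then -2 else n
-- (size_t)hash & mask for a power-of-two table size
def cpyIdx0 (h : Int) (size : Nat) : Nat := (h.emod (size : Int)).toNat
-- perturb starts as the 64-bit value of the hash
def cpyPerturb0 (h : Int) : Nat := (h.emod (2 ^ 64)).toNat

-- first empty slot among the next j slots (the LINEAR_PROBES scan)
def cpyFindEmpty (tab : List (Option Int)) : Nat → Nat → Option Nat
  | _, 0 => none
  | i, j + 1 => if tab.getD i none = none then some i else cpyFindEmpty tab (i + 1) j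

-- set_insert_clean: probe until an empty slot is found (fuel covers the full LCG cycle);
-- this is also where set_add_entry places an ABSENT key, since no slot can match it
def cpyInsertCleanLoop (key : Int) : Nat → List (Option Int) → Nat → Nat → List (Option Int)
  | 0, tab, _, _ => tab
  | fuel + 1, tab, i, perturb =>
    if tab.getD i none = none then tab.set i (some key)
    else
      match (if i + 9 ≤ tab.length - 1 then cpyFindEmpty tab (i + 1) 9 else none) with
      | some idx => tab.set idx (some key)
      | none => cpyInsertCleanLoop key fuel tab ((i * 5 + 1 + perturb / 32) % tab.length) (perturb / 32)

def cpyInsertClean (tab : List (Option Int)) (key : Int) : List (Option Int) :=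
  cpyInsertCleanLoop key (tab.length + 64) tab (cpyIdx0 (cpyHash key) tab.length) (cpyPerturb0 (cpyHash key))

structure CPySet where
  table : List (Option Int)
  fill : Nat
deriving Repr, DecidableEq

def cpyEmpty : CPySet := ⟨List.replicate 8 none, 0⟩

-- newsize = 8; while newsize <= minused: newsize <<= 1
def cpyGrow : Nat → Nat → Nat → Nat
  | 0, cur, _ => cur
  | f + 1, cur, minused => if cur ≤ minused then cpyGrow f (cur * 2) minused else cur

-- set_table_resize: reinsert the old entries in table order into the fresh table
def cpyResize (entries : List Int) (minused : Nat) : List (Option Int) :=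
  entries.foldl cpyInsertClean (List.replicate (cpyGrow 64 8 minused) none)

-- s.add(key): a no-op on a present key, else insert along the probe sequence and grow
-- (×4, ×2 above 50000 used) when fill*5 >= mask*3
def cpyAdd (s : CPySet) (key : Int) : CPySet :=
  if (s.table.filterMap id).contains key then s
  else
    let tab' := cpyInsertClean s.table key
    if (s.fill + 1) * 5 ≥ (tab'.length - 1) * 3 then
      ⟨cpyResize (tab'.filterMap id) (if s.fill + 1 > 50000 then (s.fill + 1) * 2 else (s.fill + 1) * 4), s.fill + 1⟩
    else ⟨tab', s.fill + 1⟩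

-- list(s): the occupied slots in table order
def cpyToList (s : CPySet) : List Int := s.table.filterMap id
-- set(xs)
def cpyOfList (l : List Int) : CPySet := l.foldl cpyAdd cpyEmpty
-- a.intersection(b): iterate the smaller set (b on ties), test in the other, add hits
def cpyInter (a b : CPySet) : CPySet :=
  let la := cpyToList a
  let lb := cpyToList b
  let p := if lb.length > la.length then (la, lb) else (lb, la)
  cpyOfList (p.1.filter (fun x => p.2.contains x))

def find_similar_vehicles_same_camera (args : Int × (List (Int × Int × Int)) × (List (Int × List (Int × List Int)))) : Int × (List (Int × List Int)) × List Int :=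
  let vid := args.1
  let attrs : PySem.Dict Int (Int × Int) := PySem.Dict.ofList args.2.1
  let camd : PySem.Dict Int (PySem.Dict Int (List Int)) :=
    PySem.Dict.ofList (args.2.2.map (fun p => (p.1, PySem.Dict.ofList p.2)))
  let tc := attrs.getD vid (0, 0)                          -- KeyError when vid missing: outside Pre_
  let curCams := cpyOfList (camd.getD vid PySem.Dict.empty).keys
  let res := attrs.keys.foldl (fun st other =>
      if vid ≠ other then
        let otc := attrs.getD other (0, 0)
        if tc.1 = otc.1 ∧ tc.2 = otc.2 then
          let otherCams := cpyOfList (camd.getD other PySem.Dict.empty).keys   -- KeyError when missing: outside Pre_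
          let common := cpyToList (cpyInter curCams otherCams)
          if common ≠ [] then
            (common.foldl (fun d cam => d.modify cam cpyEmpty (fun t => cpyAdd t other)) st.1, st.2)
          else (st.1, cpyAdd st.2 other)
        else st
      else st)
    ((PySem.Dict.empty : PySem.Dict Int CPySet), cpyEmpty)
  (vid, res.1.items.map (fun p => (p.1, cpyToList p.2)), cpyToList res.2)

-- ===== PORT B =====
def find_similar_vehicles_same_camera_alt (args : Int × (List (Int × Int × Int)) × (List (Int × List (Int × List Int)))) : Int × (List (Int × List Int)) × List Int :=
  let vid := args.1
  let attrs : PySem.Dict Int (Int × Int) := PySem.Dict.ofList args.2.1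
  let camd : PySem.Dict Int (PySem.Dict Int (List Int)) :=
    PySem.Dict.ofList (args.2.2.map (fun p => (p.1, PySem.Dict.ofList p.2)))
  let target := attrs.getD vid (0, 0)
  let curCams := cpyOfList (camd.getD vid PySem.Dict.empty).keys
  -- one map from each matching vehicle to its common-camera list
  let common : List (Int × List Int) :=
    (attrs.items.filter (fun p => p.1 ≠ vid ∧ p.2 = target)).map
      (fun p => (p.1, cpyToList (cpyInter curCams (cpyOfList (camd.getD p.1 PySem.Dict.empty).keys))))
  -- the cameras, in order of first appearance (dict.fromkeys)
  let camOrder := PySem.List.dedup (common.flatMap (fun q => q.2))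
  -- per camera, gather the vehicles seen on it
  let same := camOrder.map (fun cam =>
    (cam, cpyToList (cpyOfList ((common.filter (fun q => q.2.contains cam)).map (fun q => q.1)))))
  -- the matching vehicles sharing no camera
  let diff := cpyToList (cpyOfList ((common.filter (fun q => q.2 = ([] : List Int))).map (fun q => q.1)))
  (vid, same, diff)

-- ===== PRECONDITION & SPEC =====
-- Pre_ excludes exactly the KeyErrors of the Python: vehicle_id must be a key of both dicts,
-- and every other vehicle with the same (vtype, color) must be a key of vehicle_camera_dict.
def Pre_find_similar_vehicles_same_camera (args : Int × (List (Int × Int × Int)) × (List (Int × List (Int × List Int)))) : Prop :=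
  (PySem.Dict.ofList args.2.1).contains args.1 = true ∧
  args.1 ∈ args.2.2.map (fun p => p.1) ∧
  ∀ p ∈ (PySem.Dict.ofList args.2.1).items, p.1 ≠ args.1 →
    p.2 = (PySem.Dict.ofList args.2.1).getD args.1 (0, 0) → p.1 ∈ args.2.2.map (fun p => p.1)
instance (args : Int × (List (Int × Int × Int)) × (List (Int × List (Int × List Int)))) : Decidable (Pre_find_similar_vehicles_same_camera args) := by unfold Pre_find_similar_vehicles_same_camera; infer_instance

def pvWitness_find_similar_vehicles_same_camera : (Int × (List (Int × Int × Int)) × (List (Int × List (Int × List Int)))) :=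
  (1, [(1, 3, 4), (2, 3, 4)], [(1, [(7, [0])]), (2, [(7, [0])])])

def Spec_find_similar_vehicles_same_camera (args : Int × (List (Int × Int × Int)) × (List (Int × List (Int × List Int)))) (out : Int × (List (Int × List Int)) × List Int) : Prop := out = find_similar_vehicles_same_camera_alt args
instance (args : Int × (List (Int × Int × Int)) × (List (Int × List (Int × List Int)))) (out : Int × (List (Int × List Int)) × List Int) : Decidable (Spec_find_similar_vehicles_same_camera args out) := by unfold Spec_find_similar_vehicles_same_camera; infer_instance

-- ===== CLAIM (what is proved, stated in full; the proofs are below) =====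
def Claim_equal_find_similar_vehicles_same_camera : Prop := ∀ (args : Int × (List (Int × Int × Int)) × (List (Int × List (Int × List Int)))), Dom_find_similar_vehicles_same_camera args → Pre_find_similar_vehicles_same_camera args → Spec_find_similar_vehicles_same_camera args (find_similar_vehicles_same_camera args)

-- ===== LEMMAS AND PROOFS =====

-- ## the cpy tables never hold a key twice (what lets the gather scan replace the scatter) ##

theorem pv_findEmpty_none (tab : List (Option Int)) :
    ∀ i j idx, cpyFindEmpty tab i j = some idx → tab.getD idx none = none := by
  intro i j
  induction j generalizing i with
  | zero => intro idx h; cases h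
  | succ j ih =>
    intro idx h
    unfold cpyFindEmpty at h
    by_cases he : tab.getD i none = none
    · rw [if_pos he] at h; cases h; exact he
    · rw [if_neg he] at h; exact ih (i + 1) idx h

theorem pv_set_fm (tab : List (Option Int)) (i : Nat) (k : Int) (h : tab.getD i none = none) :
    tab.set i (some k) = tab ∨ ((tab.set i (some k)).filterMap id).Perm (k :: tab.filterMap id) := by
  by_cases hi : i < tab.length
  · right
    rw [List.set_eq_take_cons_drop _ hi]
    have hdrop : tab.drop i = none :: tab.drop (i + 1) := by
      have : tab[i] = none := by
        have := List.getD_eq_getElem tab none hi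
        rw [this] at h; exact h
      rw [List.drop_eq_getElem_cons hi, this]
    have htab : tab.filterMap id = (tab.take i).filterMap id ++ (tab.drop (i + 1)).filterMap id := by
      conv_lhs => rw [← List.take_append_drop i tab]
      rw [List.filterMap_append, hdrop]
      simp
    rw [htab, List.filterMap_append]
    simp only [List.filterMap_cons, id]
    exact List.perm_middle
  · left
    exact List.set_eq_of_length_le (by omega)

theorem pv_insertLoop_fm (k : Int) :
    ∀ (fuel : Nat) (tab : List (Option Int)) (i p : Nat),
      cpyInsertCleanLoop k fuel tab i p = tab ∨
      ((cpyInsertCleanLoop k fuel tab i p).filterMap id).Perm (k :: tab.filterMap id) := by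
  intro fuel
  induction fuel with
  | zero => intro tab i p; left; rfl
  | succ fuel ih =>
    intro tab i p
    unfold cpyInsertCleanLoop
    by_cases he : tab.getD i none = none
    · rw [if_pos he]; exact pv_set_fm tab i k he
    · rw [if_neg he]
      cases hm : (if i + 9 ≤ tab.length - 1 then cpyFindEmpty tab (i + 1) 9 else none) with
      | some idx =>
        have hidx : tab.getD idx none = none := by
          by_cases hb : i + 9 ≤ tab.length - 1
          · rw [if_pos hb] at hm; exact pv_findEmpty_none tab (i + 1) 9 idx hm
          · rw [if_neg hb] at hm; cases hm
        exact pv_set_fm tab idx k hidx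
      | none => exact ih tab ((i * 5 + 1 + p / 32) % tab.length) (p / 32)

theorem pv_insertClean_fm (tab : List (Option Int)) (k : Int) :
    cpyInsertClean tab k = tab ∨ ((cpyInsertClean tab k).filterMap id).Perm (k :: tab.filterMap id) :=
  pv_insertLoop_fm k _ tab _ _

theorem pv_insertClean_nodup (tab : List (Option Int)) (k : Int)
    (h1 : (tab.filterMap id).Nodup) (h2 : k ∉ tab.filterMap id) :
    ((cpyInsertClean tab k).filterMap id).Nodup ∧
    ∀ x ∈ (cpyInsertClean tab k).filterMap id, x = k ∨ x ∈ tab.filterMap id := by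
  cases pv_insertClean_fm tab k with
  | inl h => rw [h]; exact ⟨h1, fun x hx => Or.inr hx⟩
  | inr h =>
    constructor
    · exact h.nodup_iff.mpr (List.nodup_cons.mpr ⟨h2, h1⟩)
    · intro x hx
      have := h.mem_iff.mp hx
      simpa using this

theorem pv_resize_fold_nodup :
    ∀ (entries : List Int) (acc : List (Option Int)),
      (acc.filterMap id).Nodup → (∀ x ∈ acc.filterMap id, x ∉ entries) → entries.Nodup →
      ((entries.foldl cpyInsertClean acc).filterMap id).Nodup := by
  intro entries
  induction entries with
  | nil => intro acc h1 _ _; exact h1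
  | cons e es ih =>
    intro acc h1 h2 h3
    have he : e ∉ acc.filterMap id := fun hmem => h2 e hmem (List.mem_cons_self)
    obtain ⟨hn, hsub⟩ := pv_insertClean_nodup acc e h1 he
    rw [List.foldl_cons]
    refine ih _ hn ?_ (List.nodup_cons.mp h3).2
    intro x hx
    cases hsub x hx with
    | inl hxe => rw [hxe]; exact (List.nodup_cons.mp h3).1
    | inr hxa => intro hxs; exact h2 x hxa (List.mem_cons_of_mem _ hxs)

theorem pv_nodup_add (s : CPySet) (k : Int) (h : (cpyToList s).Nodup) :
    (cpyToList (cpyAdd s k)).Nodup := by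
  unfold cpyAdd
  by_cases hc : (s.table.filterMap id).contains k = true
  · rw [if_pos hc]; exact h
  · rw [if_neg hc]
    have hk : k ∉ s.table.filterMap id := by
      intro hmem
      exact hc (List.elem_eq_true_of_mem hmem)
    obtain ⟨hn, _⟩ := pv_insertClean_nodup s.table k h hk
    by_cases hr : (s.fill + 1) * 5 ≥ ((cpyInsertClean s.table k).length - 1) * 3
    · simp only [ge_iff_le, hr, if_true]
      unfold cpyToList cpyResize
      refine pv_resize_fold_nodup _ _ ?_ ?_ hn
      · simp
      · simp
    · simp only [ge_iff_le, hr, if_false]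
      exact hn

theorem pv_nodup_foldl_add :
    ∀ (l : List Int) (s : CPySet), (cpyToList s).Nodup → (cpyToList (l.foldl cpyAdd s)).Nodup := by
  intro l
  induction l with
  | nil => intro s h; exact h
  | cons a l ih => intro s h; exact ih _ (pv_nodup_add s a h)

theorem pv_nodup_ofList (l : List Int) : (cpyToList (cpyOfList l)).Nodup := by
  refine pv_nodup_foldl_add l cpyEmpty ?_
  unfold cpyToList cpyEmpty
  simp

theorem pv_nodup_inter (a b : CPySet) : (cpyToList (cpyInter a b)).Nodup := by
  unfold cpyInter
  exact pv_nodup_ofList _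

-- ## loop-shape lemmas relating A's single scatter loop to B's staged gathers ##

-- A's interleaved loop is a pair of independent loops (dict scatter, difference set)
theorem pv_loop_split (common : Int → List Int) (L : List Int) :
    ∀ (d : PySem.Dict Int CPySet) (s : CPySet),
    L.foldl (fun st o =>
        if common o ≠ [] then
          ((common o).foldl (fun d' cam => d'.modify cam cpyEmpty (fun t => cpyAdd t o)) st.1, st.2)
        else (st.1, cpyAdd st.2 o)) (d, s)
    = (L.foldl (fun d' o => (common o).foldl (fun d'' cam => d''.modify cam cpyEmpty (fun t => cpyAdd t o)) d') d,
       (L.filter (fun o => common o = [])).foldl cpyAdd s) := by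
  induction L with
  | nil => intro d s; rfl
  | cons a L ih =>
    intro d s
    by_cases h : common a = []
    · rw [List.foldl_cons, if_neg (by simp [h]), List.filter_cons_of_pos (by simp [h]),
        List.foldl_cons, List.foldl_cons, h, List.foldl_nil]
      exact ih d (cpyAdd s a)
    · rw [List.foldl_cons, if_pos h, List.filter_cons_of_neg (by simp [h]),
        List.foldl_cons]
      exact ih _ s

-- folding over a flatMap is the nested fold
theorem pv_foldl_flatMap {α β γ : Type} (f : α → List β) (g : γ → β → γ) (L : List α) :
    ∀ init : γ, (L.flatMap f).foldl g init = L.foldl (fun acc o => (f o).foldl g acc) init := by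
  induction L with
  | nil => intro init; rfl
  | cons a L ih => intro init; simp only [List.flatMap_cons, List.foldl_append, List.foldl_cons, ih]

-- a guarded fold is the fold over the filtered, projected list
theorem pv_foldl_filter_map {α β γ : Type} (l : List α) (q : α → Bool) (key : α → γ)
    (G : β → γ → β) : ∀ init : β,
    l.foldl (fun st p => if q p then G st (key p) else st) init
      = ((l.filter q).map key).foldl G init := by
  induction l with
  | nil => intro init; rfl
  | cons a l ih =>
    intro init
    by_cases h : q a
    · rw [List.foldl_cons, if_pos h, List.filter_cons_of_pos h, List.map_cons, List.foldl_cons, ih]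
    · rw [List.foldl_cons, if_neg h, List.filter_cons_of_neg h, ih]

-- what the scatter dict holds at key c: the adds of exactly the pairs carrying c
theorem pv_getD_scatter (ps : List (Int × Int)) :
    ∀ (d : PySem.Dict Int CPySet) (c : Int),
    (ps.foldl (fun d p => d.modify p.1 cpyEmpty (fun t => cpyAdd t p.2)) d).getD c cpyEmpty
      = ((ps.filter (fun p => p.1 == c)).map (fun p => p.2)).foldl cpyAdd (d.getD c cpyEmpty) := by
  induction ps with
  | nil => intro d c; rfl
  | cons p ps ih =>
    intro d c
    rw [List.foldl_cons, ih]
    by_cases h : p.1 = c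
    · rw [List.filter_cons_of_pos (by simp [h]), List.map_cons, List.foldl_cons,
        PySem.Dict.getD_modify, if_pos h.symm, h]
    · rw [List.filter_cons_of_neg (by simp [h]),
        PySem.Dict.getD_modify, if_neg (Ne.symm h)]

-- the pairs carrying camera c, projected back, are the vehicles whose camera list holds c
theorem pv_flat_filter (CC : Int → List Int) (matched : List Int)
    (hCC : ∀ o, (CC o).Nodup) (cam : Int) :
    ((matched.flatMap (fun o => (CC o).map (fun c => (c, o)))).filter (fun p => p.1 == cam)).map (fun p => p.2)
      = matched.filter (fun o => (CC o).contains cam) := by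
  induction matched with
  | nil => rfl
  | cons o os ih =>
    rw [List.flatMap_cons, List.filter_append, List.map_append, ih]
    have hhead : (((CC o).map (fun c => (c, o))).filter (fun p => p.1 == cam)).map (fun p => p.2)
        = if (CC o).contains cam then [o] else [] := by
      rw [List.filter_map]
      have : ((CC o).filter ((fun p : Int × Int => p.1 == cam) ∘ (fun c => (c, o)))) = (CC o).filter (· == cam) := rfl
      rw [this, List.filter_beq, List.map_map]
      by_cases hm : cam ∈ CC o
      · have h1 : (CC o).count cam = 1 :=
          le_antisymm (List.nodup_iff_count_le_one.mp (hCC o) cam) (List.one_le_count_iff.mpr hm)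
        rw [h1, if_pos (List.elem_eq_true_of_mem hm)]
        rfl
      · have h0 : (CC o).count cam = 0 := List.count_eq_zero.mpr hm
        rw [h0, if_neg (by simpa using hm)]
        rfl
    rw [List.filter_cons, hhead]
    by_cases hm : cam ∈ CC o
    · simp [hm]
    · simp [hm]

-- the scatter dict, rendered to lists, is the camera-major gather
theorem pv_dict_out (CC : Int → List Int) (matched : List Int) (hCC : ∀ o, (CC o).Nodup) :
    (matched.foldl (fun d o => (CC o).foldl (fun dd cam => dd.modify cam cpyEmpty (fun t => cpyAdd t o)) d)
        (PySem.Dict.empty : PySem.Dict Int CPySet)).items.map (fun p => (p.1, cpyToList p.2))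
      = (PySem.List.dedup (matched.flatMap CC)).map
          (fun cam => (cam, cpyToList (cpyOfList (matched.filter (fun o => (CC o).contains cam))))) := by
  set ps := matched.flatMap (fun o => (CC o).map (fun c => (c, o))) with hps
  have hfold : matched.foldl (fun d o => (CC o).foldl (fun dd cam => dd.modify cam cpyEmpty (fun t => cpyAdd t o)) d)
      (PySem.Dict.empty : PySem.Dict Int CPySet)
      = ps.foldl (fun d p => d.modify p.1 cpyEmpty (fun t => cpyAdd t p.2)) PySem.Dict.empty := by
    rw [hps, pv_foldl_flatMap]
    refine PySem.List.foldl_congr_mem _ _ _ _ (fun d o _ => ?_)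
    rw [List.foldl_map]
  rw [hfold]
  set D := ps.foldl (fun d p => d.modify p.1 cpyEmpty (fun t => cpyAdd t p.2)) PySem.Dict.empty with hD
  have hkeys : D.keys = PySem.Set.ofList (matched.flatMap CC) := by
    rw [hD, PySem.Dict.keys_foldl_modify_key, PySem.Dict.keys_empty, PySem.Set.update_nil_left, hps,
      List.map_flatMap]
    simp [List.map_map, Function.comp_def]
  have hnd : D.keys.Nodup := by
    rw [hkeys]; exact PySem.Set.nodup_ofList _
  rw [PySem.Dict.items_eq_map_keys D hnd cpyEmpty, List.map_map, hkeys, PySem.List.dedup_eq_ofList]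
  refine List.map_congr_left (fun cam _ => ?_)
  have : D.getD cam cpyEmpty = cpyOfList (matched.filter (fun o => (CC o).contains cam)) := by
    rw [hD, pv_getD_scatter, PySem.Dict.getD_empty, pv_flat_filter CC matched hCC cam]
    rfl
  simp [this]

-- ## the main equality ##

theorem pv_core (vid : Int) (tc : Int × Int) (attrs : PySem.Dict Int (Int × Int))
    (CC : Int → List Int) (hnd : attrs.keys.Nodup) :
    (attrs.keys.foldl (fun st other =>
      if vid ≠ other then
        if tc.1 = (attrs.getD other (0, 0)).1 ∧ tc.2 = (attrs.getD other (0, 0)).2 then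
          if CC other ≠ [] then
            ((CC other).foldl (fun d cam => d.modify cam cpyEmpty (fun t => cpyAdd t other)) st.1, st.2)
          else (st.1, cpyAdd st.2 other)
        else st
      else st) ((PySem.Dict.empty : PySem.Dict Int CPySet), cpyEmpty))
    = (let matched := (attrs.items.filter (fun p => decide (p.1 ≠ vid ∧ p.2 = tc))).map (fun p => p.1)
       (matched.foldl (fun d o => (CC o).foldl (fun dd cam => dd.modify cam cpyEmpty (fun t => cpyAdd t o)) d)
          (PySem.Dict.empty : PySem.Dict Int CPySet),
        cpyOfList (matched.filter (fun o => CC o = [])))) := by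
  have hpoint : ∀ (st : PySem.Dict Int CPySet × CPySet), ∀ p ∈ attrs.items,
      (if vid ≠ p.1 then
         if tc.1 = (attrs.getD p.1 (0, 0)).1 ∧ tc.2 = (attrs.getD p.1 (0, 0)).2 then
           if CC p.1 ≠ [] then
             ((CC p.1).foldl (fun d cam => d.modify cam cpyEmpty (fun t => cpyAdd t p.1)) st.1, st.2)
           else (st.1, cpyAdd st.2 p.1)
         else st
       else st)
      = (if decide (p.1 ≠ vid ∧ p.2 = tc) = true then
           (if CC p.1 ≠ [] then
             ((CC p.1).foldl (fun d cam => d.modify cam cpyEmpty (fun t => cpyAdd t p.1)) st.1, st.2)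
           else (st.1, cpyAdd st.2 p.1))
         else st) := by
    intro st p hp
    have hp' : (p.1, p.2) ∈ attrs.items := by simpa using hp
    have hv : attrs.getD p.1 (0, 0) = p.2 := PySem.Dict.getD_of_mem_items attrs hp' hnd (0, 0)
    rw [hv]
    by_cases h1 : vid = p.1
    · simp [h1]
    · by_cases h2 : p.2 = tc
      · simp [h1, Ne.symm h1, h2]
      · have h3 : ¬(tc.1 = p.2.1 ∧ tc.2 = p.2.2) := fun hc => h2 (Prod.ext_iff.mpr ⟨hc.1.symm, hc.2.symm⟩)
        simp [h1, Ne.symm h1, h2, h3]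
  rw [show attrs.keys = attrs.items.map (fun p : Int × Int × Int => p.1) from rfl]
  rw [List.foldl_map, PySem.List.foldl_congr_mem _ _ _ _ hpoint,
    pv_foldl_filter_map attrs.items (fun p => decide (p.1 ≠ vid ∧ p.2 = tc)) (fun p => p.1)
      (fun st o =>
        if CC o ≠ [] then
          ((CC o).foldl (fun d cam => d.modify cam cpyEmpty (fun t => cpyAdd t o)) st.1, st.2)
        else (st.1, cpyAdd st.2 o)) ((PySem.Dict.empty : PySem.Dict Int CPySet), cpyEmpty),
    pv_loop_split]
  rfl

theorem find_similar_vehicles_same_camera_ab (args : Int × (List (Int × Int × Int)) × (List (Int × List (Int × List Int)))) :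
    find_similar_vehicles_same_camera args = find_similar_vehicles_same_camera_alt args := by
  obtain ⟨vid, alist, clist⟩ := args
  simp only [find_similar_vehicles_same_camera, find_similar_vehicles_same_camera_alt]
  set attrs : PySem.Dict Int (Int × Int) := PySem.Dict.ofList alist with hattrs
  set camd : PySem.Dict Int (PySem.Dict Int (List Int)) :=
    PySem.Dict.ofList (clist.map (fun p => (p.1, PySem.Dict.ofList p.2))) with hcamd
  set tc := attrs.getD vid (0, 0) with htc
  set curCams := cpyOfList (camd.getD vid PySem.Dict.empty).keys with hcur
  set CC : Int → List Int :=
    fun o => cpyToList (cpyInter curCams (cpyOfList (camd.getD o PySem.Dict.empty).keys)) with hCCdef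
  have hCC : ∀ o, (CC o).Nodup := fun o => pv_nodup_inter _ _
  have hndk : attrs.keys.Nodup := PySem.Dict.nodup_keys_ofList alist
  rw [pv_core vid tc attrs CC hndk]
  set matchedItems := attrs.items.filter (fun p => decide (p.1 ≠ vid ∧ p.2 = tc)) with hmi
  set matched := matchedItems.map (fun p : Int × Int × Int => p.1) with hm
  set common : List (Int × List Int) := matchedItems.map (fun p => (p.1, CC p.1)) with hcommon
  have hflat : common.flatMap (fun q => q.2) = matched.flatMap CC := by
    rw [hcommon, hm, List.flatMap_map, List.flatMap_map]
  have hgather : ∀ cam : Int,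
      (common.filter (fun q => q.2.contains cam)).map (fun q => q.1)
        = matched.filter (fun o => (CC o).contains cam) := by
    intro cam
    rw [hcommon, hm, List.filter_map, List.filter_map, List.map_map]
    rfl
  have hdiff : (common.filter (fun q => q.2 = ([] : List Int))).map (fun q => q.1)
      = matched.filter (fun o => CC o = []) := by
    rw [hcommon, hm, List.filter_map, List.filter_map, List.map_map]
    rfl
  refine Prod.ext rfl (Prod.ext ?_ ?_)
  · show (matched.foldl (fun d o => (CC o).foldl (fun dd cam => dd.modify cam cpyEmpty (fun t => cpyAdd t o)) d)
        (PySem.Dict.empty : PySem.Dict Int CPySet)).items.map (fun p => (p.1, cpyToList p.2))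
      = (PySem.List.dedup (common.flatMap (fun q => q.2))).map (fun cam =>
          (cam, cpyToList (cpyOfList ((common.filter (fun q => q.2.contains cam)).map (fun q => q.1)))))
    rw [pv_dict_out CC matched hCC, hflat]
    exact List.map_congr_left (fun cam _ => by rw [hgather cam])
  · show cpyToList (cpyOfList (matched.filter (fun o => CC o = [])))
      = cpyToList (cpyOfList ((common.filter (fun q => q.2 = ([] : List Int))).map (fun q => q.1)))
    rw [hdiff]

-- ===== VERDICT (by name: the statement is the Claim_ definition above) =====
theorem find_similar_vehicles_same_camera_spec : Claim_equal_find_similar_vehicles_same_camera := by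
  intro args _ _
  exact find_similar_vehicles_same_camera_ab args
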